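-- pv_equiv track=rewrite | github.com/aanupsharan/algorithms | Hashing/ManagerToEmployee.py | assign_and_print
-- ===== SOURCE A (Python) =====
-- def assign_and_print(d):
--
--     num_of_report = dict()
--
--     for i in d:
--         num_of_report[i] = 0
--
--     for i in d:
--         if i == d[i]:
--             continue
--         if d[i] in num_of_report:
--             num_of_report[d[i]] += 1
--
--     return num_of_report
-- ===== SOURCE B (Python) =====
-- def assign_and_print(d):
--     cnt = {}
--     for m in d.values():
--         cnt[m] = cnt.get(m, 0) + 1
--     return {m: cnt.get(m, 0) - (1 if d[m] == m else 0) for m in d}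
-- ===== Notes on version B (the rewrite author's own statement) =====
-- stated objective: alternative
-- what changed: B replaces A's init-to-zero loop plus guard-and-increment loop with an unconditional tally of all manager references over d.values() followed by a comprehension that subtracts the self-loop overcount per key.
import Mathlib
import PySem

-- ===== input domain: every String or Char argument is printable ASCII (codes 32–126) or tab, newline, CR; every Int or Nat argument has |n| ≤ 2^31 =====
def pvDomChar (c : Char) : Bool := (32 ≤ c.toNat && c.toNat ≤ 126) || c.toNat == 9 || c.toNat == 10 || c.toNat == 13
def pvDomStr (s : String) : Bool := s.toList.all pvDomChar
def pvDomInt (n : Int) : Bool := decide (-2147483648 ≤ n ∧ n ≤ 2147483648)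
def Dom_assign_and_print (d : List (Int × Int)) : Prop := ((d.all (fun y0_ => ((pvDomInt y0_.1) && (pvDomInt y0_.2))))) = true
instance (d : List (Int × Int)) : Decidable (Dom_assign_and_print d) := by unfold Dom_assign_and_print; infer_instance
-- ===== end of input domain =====

-- B tallies all manager references unconditionally, then corrects the self-loop overcount per key (alternative decomposition, same cost).

-- ===== PORT A =====
-- A: init every key of d to 0, then for each employee i (skipping self-loops) increment
-- num_of_report[d[i]] when d[i] is itself a key.
def assign_and_print (d : List (Int × Int)) : List (Int × Int) :=
  let dd : PySem.Dict Int Int := PySem.Dict.mk d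
  let num0 : PySem.Dict Int Int :=
    d.foldl (fun acc kv => acc.insert kv.1 (0 : Int)) PySem.Dict.empty
  let res : PySem.Dict Int Int :=
    d.foldl (fun acc kv =>
      match dd.get? kv.1 with
      | none => acc        -- unreachable: kv.1 is a key of d
      | some v =>
        if kv.1 == v then acc
        else if acc.contains v then acc.modify v 0 (· + 1) else acc) num0
  res.items

-- ===== PORT B =====
-- B: tally every manager reference in one pass over the values (cnt[m] = cnt.get(m,0)+1),
-- then emit {m: cnt.get(m,0) - (1 if d[m] == m else 0) for m in d}.
def assign_and_print_alt (d : List (Int × Int)) : List (Int × Int) :=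
  let dd : PySem.Dict Int Int := PySem.Dict.mk d
  let cnt : PySem.Dict Int Int :=
    dd.values.foldl (fun c m => c.insert m (c.getD m 0 + 1)) PySem.Dict.empty
  d.map (fun kv =>
    (kv.1, cnt.getD kv.1 0 - (if dd.getD kv.1 0 == kv.1 then 1 else 0)))

-- ===== PRECONDITION & SPEC =====
-- Pre_ requires distinct keys: the association list stands for a Python dict, whose keys
-- are always distinct, so no dict input of A is excluded.
def Pre_assign_and_print (d : List (Int × Int)) : Prop := (d.map Prod.fst).Nodup
instance (d : List (Int × Int)) : Decidable (Pre_assign_and_print d) := by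
  unfold Pre_assign_and_print; infer_instance
def pvWitness_assign_and_print : (List (Int × Int)) := [(1, 2), (2, 2), (3, 7)]

def Spec_assign_and_print (d : List (Int × Int)) (out : List (Int × Int)) : Prop := out = assign_and_print_alt d
instance (d : List (Int × Int)) (out : List (Int × Int)) : Decidable (Spec_assign_and_print d out) := by unfold Spec_assign_and_print; infer_instance

-- ===== CLAIM (what is proved, stated in full; the proofs are below) =====
def Claim_equal_assign_and_print : Prop := ∀ (d : List (Int × Int)), Dom_assign_and_print d → Pre_assign_and_print d → Spec_assign_and_print d (assign_and_print d)

-- ===== LEMMAS AND PROOFS =====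
lemma stepA_keys (dd : PySem.Dict Int Int) (l : List (Int × Int)) (acc : PySem.Dict Int Int) :
    (l.foldl (fun acc kv =>
      match dd.get? kv.1 with
      | none => acc
      | some v =>
        if kv.1 == v then acc
        else if acc.contains v then acc.modify v 0 (· + 1) else acc) acc).keys = acc.keys := by
  induction l generalizing acc with
  | nil => rfl
  | cons kv t ih =>
    simp only [List.foldl_cons]
    cases h : dd.get? kv.1 with
    | none => exact ih acc
    | some v =>
      simp only [h]
      by_cases h1 : (kv.1 == v) = true
      · rw [if_pos h1]; exact ih acc
      · rw [if_neg h1]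
        by_cases h2 : acc.contains v = true
        · rw [if_pos h2, ih, PySem.Dict.keys_modify, PySem.Dict.keys_insert_of_contains acc _ h2]
        · rw [if_neg h2]; exact ih acc

lemma stepA_getD (dd : PySem.Dict Int Int) (l : List (Int × Int)) :
    ∀ (acc : PySem.Dict Int Int) (m : Int),
      (∀ kv ∈ l, dd.get? kv.1 = some kv.2) → m ∈ acc.keys →
      (l.foldl (fun acc kv =>
        match dd.get? kv.1 with
        | none => acc
        | some v =>
          if kv.1 == v then acc
          else if acc.contains v then acc.modify v 0 (· + 1) else acc) acc).getD m 0
        = acc.getD m 0 + (l.countP (fun kv => kv.2 == m && !(kv.1 == kv.2)) : Int) := by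
  induction l with
  | nil => intro acc m _ _; simp
  | cons kv t ih =>
    intro acc m hl hm
    have hkv := hl kv (List.mem_cons_self ..)
    have hlt : ∀ p ∈ t, dd.get? p.1 = some p.2 := fun p hp => hl p (List.mem_cons_of_mem _ hp)
    simp only [List.foldl_cons, List.countP_cons]
    simp only [hkv]
    by_cases h1 : (kv.1 == kv.2) = true
    · rw [if_pos h1, ih acc m hlt hm]
      have hb : (kv.2 == m && !(kv.1 == kv.2)) = false := by simp [h1]
      simp [hb]
    · rw [if_neg h1]
      by_cases h2 : acc.contains kv.2 = true
      · rw [if_pos h2]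
        have hkeys : (acc.modify kv.2 0 (· + 1)).keys = acc.keys := by
          rw [PySem.Dict.keys_modify, PySem.Dict.keys_insert_of_contains acc _ h2]
        rw [ih _ m hlt (by rw [hkeys]; exact hm)]
        by_cases hvm : kv.2 = m
        · subst hvm
          rw [PySem.Dict.getD_modify_self]
          have hb : (kv.2 == kv.2 && !(kv.1 == kv.2)) = true := by simp [h1]
          simp only [hb, if_true]
          push_cast; ring
        · rw [PySem.Dict.getD_modify_of_ne acc 0 _ (fun h => hvm h.symm)]
          have hb : (kv.2 == m && !(kv.1 == kv.2)) = false := by simp [hvm]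
          simp [hb]
      · rw [if_neg h2]
        have hvm : kv.2 ≠ m := by
          intro h
          exact h2 ((PySem.Dict.contains_iff_mem_keys acc kv.2).mpr (h ▸ hm))
        rw [ih acc m hlt hm]
        have hb : (kv.2 == m && !(kv.1 == kv.2)) = false := by simp [hvm]
        simp [hb]

lemma countP_split (d : List (Int × Int)) (k : Int) :
    d.countP (fun p => p.2 == k)
      = d.countP (fun p => p.2 == k && !(p.1 == p.2)) + d.countP (fun p => p.1 == k && p.2 == k) := by
  induction d with
  | nil => rfl
  | cons p t ih =>
    simp only [List.countP_cons]
    by_cases h1 : p.2 = k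
    · subst h1
      by_cases h2 : p.1 = p.2 <;> simp [h2, ih] <;> omega
    · simp [h1, ih]

lemma countP_self_zero (t : List (Int × Int)) (k : Int) (hk : k ∉ t.map Prod.fst) :
    t.countP (fun p => p.1 == k && p.2 == k) = 0 := by
  rw [List.countP_eq_zero]
  intro p hp
  simp only [Bool.and_eq_true, beq_iff_eq, not_and]
  intro h1 _
  exact hk (h1 ▸ List.mem_map_of_mem (f := Prod.fst) hp)

lemma countP_self (d : List (Int × Int)) (hn : (d.map Prod.fst).Nodup) (kv : Int × Int) (hkv : kv ∈ d) :
    d.countP (fun p => p.1 == kv.1 && p.2 == kv.1) = if kv.2 == kv.1 then 1 else 0 := by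
  induction d with
  | nil => cases hkv
  | cons p t ih =>
    simp only [List.map_cons, List.nodup_cons] at hn
    rcases List.mem_cons.mp hkv with h | h
    · subst h
      simp only [List.countP_cons]
      rw [countP_self_zero t kv.1 hn.1]
      by_cases h2 : kv.2 = kv.1 <;> simp [h2]
    · have hp1 : p.1 ≠ kv.1 := by
        intro he
        exact hn.1 (he ▸ List.mem_map_of_mem (f := Prod.fst) h)
      simp only [List.countP_cons]
      have hb : (p.1 == kv.1 && p.2 == kv.1) = false := by simp [hp1]
      simp only [hb, Bool.false_eq_true, if_false, Nat.add_zero]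
      exact ih hn.2 h


lemma main_eq (d : List (Int × Int)) (hn : (d.map Prod.fst).Nodup) :
    assign_and_print d = assign_and_print_alt d := by
  have hitems : (PySem.Dict.mk d).items = d := rfl
  have hkeysmap : (PySem.Dict.mk d).keys = d.map Prod.fst := rfl
  have hkeysnd : (PySem.Dict.mk d).keys.Nodup := by rw [hkeysmap]; exact hn
  have hget : ∀ kv ∈ d, (PySem.Dict.mk d).get? kv.1 = some kv.2 := by
    intro kv hkv
    exact PySem.Dict.get?_of_mem_items _ (hitems ▸ hkv) hkeysnd
  have h0items :
      (d.foldl (fun acc kv => acc.insert kv.1 (0 : Int)) PySem.Dict.empty).items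
        = d.map (fun kv => (kv.1, (0 : Int))) := by
    have h := PySem.Dict.items_foldl_insert_fresh d Prod.fst (fun _ => (0 : Int))
      PySem.Dict.empty (fun a _ => PySem.Dict.contains_empty a.1) hn
    simpa using h
  have h0keys :
      (d.foldl (fun acc kv => acc.insert kv.1 (0 : Int)) PySem.Dict.empty).keys = d.map Prod.fst := by
    show (d.foldl (fun acc kv => acc.insert kv.1 (0 : Int)) PySem.Dict.empty).items.map (fun p => p.1)
        = d.map Prod.fst
    rw [h0items, List.map_map]
    rfl
  have h0getD : ∀ kv ∈ d,
      (d.foldl (fun acc kv => acc.insert kv.1 (0 : Int)) PySem.Dict.empty).getD kv.1 0 = 0 := by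
    intro kv hkv
    refine PySem.Dict.getD_of_mem_items _ ?_ (h0keys ▸ hn) 0
    rw [h0items]
    exact List.mem_map_of_mem hkv
  simp only [assign_and_print, assign_and_print_alt]
  rw [PySem.Dict.items_eq_map_keys _ (by rw [stepA_keys, h0keys]; exact hn) 0,
      stepA_keys, h0keys, List.map_map]
  refine List.map_congr_left ?_
  intro kv hkv
  rw [Function.comp_apply,
      stepA_getD (PySem.Dict.mk d) d _ kv.1 hget (by rw [h0keys]; exact List.mem_map_of_mem hkv),
      h0getD kv hkv,
      PySem.Dict.foldl_insert_getD_add_one_eq_counter, PySem.Dict.getD_counter,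
      PySem.Dict.getD_of_mem_items _ (hitems ▸ hkv) hkeysnd 0]
  have hvals : (PySem.Dict.mk d).values = d.map Prod.snd := rfl
  rw [hvals]
  have hc : List.count kv.1 (d.map Prod.snd) = d.countP (fun p => p.2 == kv.1) := by
    rw [List.count_eq_countP, List.countP_map]
    rfl
  rw [hc, countP_split d kv.1, countP_self d hn kv hkv]
  simp only [Prod.mk.injEq, true_and]
  by_cases h2 : kv.2 = kv.1 <;> simp [h2]


-- ===== VERDICT (by name: the statement is the Claim_ definition above) =====
theorem assign_and_print_spec : Claim_equal_assign_and_print := by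
  intro d _ hpre
  unfold Spec_assign_and_print
  exact main_eq d hpre
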